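-- pv_equiv track=rewrite | github.com/usbt0p/comp-prog-py-cpp | accepted/637.py | duration
-- ===== SOURCE A (Python) =====
-- def duration(morse):
--     dur = 0
--     for i in range(len(morse)):
--         if morse[i] == "-":
--             dur += 3
--         else:
--             dur += 1
--         dur += 1
--     dur -= 1 # quitar la ultima suma
--     return dur
-- ===== SOURCE B (Python) =====
-- def duration(morse):
--     return 2 * len(morse) + 2 * morse.count("-") - 1
-- ===== Notes on version B (the rewrite author's own statement) =====
-- stated objective: faster
-- what changed: Replaces the per-character loop and branch by a single aggregate count plus closed-form arithmetic: 2*len(morse) + 2*morse.count('-') - 1.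
import Mathlib
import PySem

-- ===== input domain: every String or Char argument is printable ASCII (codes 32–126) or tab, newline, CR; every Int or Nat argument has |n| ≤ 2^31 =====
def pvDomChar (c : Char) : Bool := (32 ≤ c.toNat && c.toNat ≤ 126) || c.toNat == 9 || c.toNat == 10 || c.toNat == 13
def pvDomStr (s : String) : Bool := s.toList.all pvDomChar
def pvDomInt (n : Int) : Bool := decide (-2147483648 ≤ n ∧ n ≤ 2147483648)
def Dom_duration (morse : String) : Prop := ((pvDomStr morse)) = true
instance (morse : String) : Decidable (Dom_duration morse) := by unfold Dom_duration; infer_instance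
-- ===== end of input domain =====

-- B replaces A's per-character loop by the closed form 2*len + 2*count('-') - 1 (timing run measured B faster).

-- ===== PORT A =====
-- loop 'for i in range(len(morse)): if morse[i] == "-": dur += 3 else: dur += 1; dur += 1', then 'dur -= 1'
def duration (morse : String) : Int :=
  ((PySem.List.pyRange 0 (PySem.Str.len morse) 1).foldl
    (fun dur i => (if PySem.List.pyGetD morse.toList i ' ' == '-' then dur + 3 else dur + 1) + 1)
    (0 : Int)) - 1

-- ===== PORT B =====
def duration_alt (morse : String) : Int :=
  2 * PySem.Str.len morse + 2 * (PySem.Str.count morse "-" : Int) - 1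

-- ===== PRECONDITION & SPEC =====
def Spec_duration (morse : String) (out : Int) : Prop := out = duration_alt morse
instance (morse : String) (out : Int) : Decidable (Spec_duration morse out) := by unfold Spec_duration; infer_instance

-- ===== CLAIM (what is proved, stated in full; the proofs are below) =====
def Claim_equal_duration : Prop := ∀ (morse : String), Dom_duration morse → Spec_duration morse (duration morse)

-- ===== LEMMAS AND PROOFS =====

-- A's loop body adds 4 for a dash and 2 otherwise
theorem duration_foldl_closed (l : List Char) (a : Int) :
    l.foldl (fun dur c => (if c == '-' then dur + 3 else dur + 1) + 1) a
      = a + 2 * l.length + 2 * l.count '-' := by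
  induction l generalizing a with
  | nil => simp
  | cons h t ih =>
    rw [List.foldl_cons, ih]
    by_cases hc : h = '-' <;> simp [hc] <;> try ring

-- Python str.count with a single-character needle is the character count
theorem chars_count_go_singleton (v : Char) :
    ∀ (cs : List Char) (fuel acc : Nat), cs.length ≤ fuel →
      PySem.Chars.count.go [v] fuel cs acc = acc + cs.count v := by
  intro cs
  induction cs with
  | nil =>
    intro fuel acc _
    cases fuel <;> simp [PySem.Chars.count.go]
  | cons h t ih =>
    intro fuel acc hle
    cases fuel with
    | zero => simp at hle
    | succ n =>
      by_cases hc : h = v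
      · have hp : ([v].isPrefixOf (h :: t)) = true := by
          simp [List.isPrefixOf, hc]
        simp only [PySem.Chars.count.go, hp, if_true]
        rw [show List.drop (List.length [v]) (h :: t) = t from rfl]
        rw [ih n (acc + 1) (by simpa using hle)]
        simp [hc]
        omega
      · have hp : ([v].isPrefixOf (h :: t)) = false := by
          simp [List.isPrefixOf]
          exact fun hh => hc hh.symm
        simp only [PySem.Chars.count.go, hp]
        rw [ih n acc (by simpa using hle)]
        simp [hc]

theorem chars_count_singleton (cs : List Char) (v : Char) :
    PySem.Chars.count cs [v] = cs.count v := by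
  simp [PySem.Chars.count, chars_count_go_singleton v cs cs.length 0 le_rfl]

-- ===== VERDICT (by name: the statement is the Claim_ definition above) =====
theorem duration_spec : Claim_equal_duration := by
  intro morse _
  unfold Spec_duration duration duration_alt
  rw [PySem.Str.count_eq, show ("-" : String).toList = ['-'] from rfl, chars_count_singleton]
  rw [show PySem.Str.len morse = PySem.List.len morse.toList by
        simp [PySem.Str.len_eq, PySem.List.len_eq]]
  rw [PySem.List.foldl_pyRange_zero_pyGetD
        (f := fun dur c => (if c == '-' then dur + 3 else dur + 1) + 1)
        (xs := morse.toList) (d := ' ')]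
  rw [duration_foldl_closed]
  simp [PySem.List.len_eq]
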